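-- pv_equiv track=rewrite | github.com/tahayehia1995/ROM_RL_CO2 | DigitalTwin/engine/digital_twin_engine.py | _detect_transition_type_from_keys
-- ===== SOURCE A (Python) =====
-- def _detect_transition_type_from_keys(sd: dict) -> str:
--     """Detect transition type from state_dict keys (ported from testing dashboard)."""
--     keys = set(sd.keys()) if isinstance(sd, dict) else set()
--     has = lambda pat: any(pat in k for k in keys)
--
--     if "sindy_coefficients" in keys:
--         return "sindy"
--     if has("cde_func.net."):
--         return "neural_cde"
--     if has("drift_net.") and has("diffusion_net."):
--         return "latent_sde"
--     if has("temporal_transformer."):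
--         return "transformer"
--     if has("branch_net.") and has("trunk_net."):
--         return "deeponet"
--     if has("spectral_gates.") and has("rnn_lambda_real."):
--         return "skolr"
--     if "ren_H" in keys:
--         return "ren"
--     if "K" in keys and has("aft.aft_W_q"):
--         return "koopman_aft"
--     if "U_skew_params" in keys and "sigma_raw" in keys:
--         return "dissipative_koopman"
--     if "A_bilinear" in keys:
--         return "bilinear_koopman"
--     if has("lift_net.") and "exp_r_real" in keys:
--         return "isfno"
--     if "A_skew_params" in keys:
--         return "ct_koopman"
--     if has("H_net.") and "B_ctrl" in keys:
--         return "hamiltonian"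
--     if has("lstm_cells."):
--         return "lstm"
--     if has("gru_cells."):
--         return "gru"
--     if "A_log" in keys and "delta_proj.weight" in keys and "out_proj.weight" in keys:
--         return "mamba2"
--     if "A_log" in keys and "delta_proj.weight" in keys:
--         return "mamba"
--     if has("selector.") and "Kt_layer.weight" in keys:
--         return "deep_koopman"
--     if ("eig_raw" in keys or "eig_mag_raw" in keys) and not has("selector."):
--         return "stable_koopman"
--     if "K" in keys and "At_layer.weight" not in keys:
--         return "koopman"
--     if has("selector.") and "alpha_layer.weight" in keys and "V_real" in keys:
--         return "s5"
--     if has("selector.") and "alpha_layer.weight" in keys and "U_real_layer.weight" in keys: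
--         return "s4d_dplr"
--     if has("selector.") and "alpha_layer.weight" in keys:
--         return "s4d"
--     if has("selector.") and "nu_layer.weight" in keys:
--         return "clru"
--     if has("ode_func.net."):
--         return "nonlinear"
--     if has("trans_encoder.") and "At_layer.weight" in keys:
--         return "linear"
--     return "linear"
-- ===== SOURCE B (Python) =====
-- # Single pass over the keys folds every key's feature contributions into one
-- # integer bitmask; a declarative (required_bits, forbidden_bits, label) rule
-- # table is then decided purely by bit tests on that mask.
--
-- # (bit, exact?, pattern): exact -> key == pattern, else pattern is a substring.
-- _FEATURES = [
--     (0, True, "sindy_coefficients"), (1, True, "ren_H"), (2, True, "K"),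
--     (3, True, "U_skew_params"), (4, True, "sigma_raw"), (5, True, "A_bilinear"),
--     (6, True, "exp_r_real"), (7, True, "A_skew_params"), (8, True, "B_ctrl"),
--     (9, True, "A_log"), (10, True, "delta_proj.weight"), (11, True, "out_proj.weight"),
--     (12, True, "Kt_layer.weight"), (13, True, "eig_raw"), (13, True, "eig_mag_raw"),
--     (14, True, "At_layer.weight"), (15, True, "alpha_layer.weight"), (16, True, "V_real"),
--     (17, True, "U_real_layer.weight"), (18, True, "nu_layer.weight"),
--     (19, False, "cde_func.net."), (20, False, "drift_net."), (21, False, "diffusion_net."),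
--     (22, False, "temporal_transformer."), (23, False, "branch_net."), (24, False, "trunk_net."),
--     (25, False, "spectral_gates."), (26, False, "rnn_lambda_real."),
--     (27, False, "aft.aft_W_q"), (28, False, "lift_net."), (29, False, "H_net."),
--     (30, False, "lstm_cells."), (31, False, "gru_cells."), (32, False, "selector."),
--     (33, False, "ode_func.net."),
-- ]
--
-- # (required bits, forbidden bits, label), first match wins; default "linear".
-- _RULES = [
--     ((0,), (), "sindy"), ((19,), (), "neural_cde"), ((20, 21), (), "latent_sde"),
--     ((22,), (), "transformer"), ((23, 24), (), "deeponet"), ((25, 26), (), "skolr"),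
--     ((1,), (), "ren"), ((2, 27), (), "koopman_aft"), ((3, 4), (), "dissipative_koopman"),
--     ((5,), (), "bilinear_koopman"), ((28, 6), (), "isfno"), ((7,), (), "ct_koopman"),
--     ((29, 8), (), "hamiltonian"), ((30,), (), "lstm"), ((31,), (), "gru"),
--     ((9, 10, 11), (), "mamba2"), ((9, 10), (), "mamba"), ((32, 12), (), "deep_koopman"),
--     ((13,), (32,), "stable_koopman"), ((2,), (14,), "koopman"),
--     ((32, 15, 16), (), "s5"), ((32, 15, 17), (), "s4d_dplr"), ((32, 15), (), "s4d"),
--     ((32, 18), (), "clru"), ((33,), (), "nonlinear"),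
-- ]
--
--
-- def _detect_transition_type_from_keys(sd: dict) -> str:
--     keys = set(sd.keys()) if isinstance(sd, dict) else set()
--     mask = 0
--     for k in keys:
--         for bit, exact, pat in _FEATURES:
--             if (pat == k) if exact else (pat in k):
--                 mask |= 1 << bit
--     for req, forb, label in _RULES:
--         if all((mask >> b) & 1 for b in req) and not any((mask >> b) & 1 for b in forb):
--             return label
--     return "linear"
-- ===== Notes on version B (the rewrite author's own statement) =====
-- stated objective: alternative
-- what changed: A's flat if-chain with repeated lazy substring scans is replaced by a single pass over the keys that ORs each key's feature bits into one integer bitmask, plus a declarative (required-bits, forbidden-bits, label) rule table decided purely by bit tests on that mask.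
import Mathlib
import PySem

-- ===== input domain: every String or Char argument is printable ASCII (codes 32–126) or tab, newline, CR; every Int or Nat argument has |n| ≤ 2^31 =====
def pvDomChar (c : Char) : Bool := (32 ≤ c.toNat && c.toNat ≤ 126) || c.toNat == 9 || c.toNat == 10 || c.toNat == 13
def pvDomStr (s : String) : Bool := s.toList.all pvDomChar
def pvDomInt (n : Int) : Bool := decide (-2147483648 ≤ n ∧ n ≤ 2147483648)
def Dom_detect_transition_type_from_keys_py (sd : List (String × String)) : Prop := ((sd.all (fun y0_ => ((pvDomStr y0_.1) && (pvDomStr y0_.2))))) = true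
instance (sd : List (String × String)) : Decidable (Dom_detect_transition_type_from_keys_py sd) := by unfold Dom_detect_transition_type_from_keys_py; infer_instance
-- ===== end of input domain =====

-- B replaces A's per-pattern lazy scans and flat if-chain by a single pass over the keys folding
-- feature bits into one integer bitmask, decided by a (required, forbidden) bit-rule table
-- (objective: alternative data structure, same asymptotic cost).

-- ===== PORT A =====
def detect_transition_type_from_keys_py (sd : List (String × String)) : String :=
  let keys : PySem.Set String := PySem.Set.ofList (PySem.Dict.keys (PySem.Dict.mk sd))
  let has : String → Bool := fun pat => keys.any (fun k => PySem.Str.isIn pat k)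
  if PySem.Set.contains keys "sindy_coefficients" then "sindy"
  else if has "cde_func.net." then "neural_cde"
  else if has "drift_net." && has "diffusion_net." then "latent_sde"
  else if has "temporal_transformer." then "transformer"
  else if has "branch_net." && has "trunk_net." then "deeponet"
  else if has "spectral_gates." && has "rnn_lambda_real." then "skolr"
  else if PySem.Set.contains keys "ren_H" then "ren"
  else if PySem.Set.contains keys "K" && has "aft.aft_W_q" then "koopman_aft"
  else if PySem.Set.contains keys "U_skew_params" && PySem.Set.contains keys "sigma_raw" then "dissipative_koopman"
  else if PySem.Set.contains keys "A_bilinear" then "bilinear_koopman"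
  else if has "lift_net." && PySem.Set.contains keys "exp_r_real" then "isfno"
  else if PySem.Set.contains keys "A_skew_params" then "ct_koopman"
  else if has "H_net." && PySem.Set.contains keys "B_ctrl" then "hamiltonian"
  else if has "lstm_cells." then "lstm"
  else if has "gru_cells." then "gru"
  else if PySem.Set.contains keys "A_log" && (PySem.Set.contains keys "delta_proj.weight" && PySem.Set.contains keys "out_proj.weight") then "mamba2"
  else if PySem.Set.contains keys "A_log" && PySem.Set.contains keys "delta_proj.weight" then "mamba"
  else if has "selector." && PySem.Set.contains keys "Kt_layer.weight" then "deep_koopman"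
  else if (PySem.Set.contains keys "eig_raw" || PySem.Set.contains keys "eig_mag_raw") && !(has "selector.") then "stable_koopman"
  else if PySem.Set.contains keys "K" && !(PySem.Set.contains keys "At_layer.weight") then "koopman"
  else if has "selector." && (PySem.Set.contains keys "alpha_layer.weight" && PySem.Set.contains keys "V_real") then "s5"
  else if has "selector." && (PySem.Set.contains keys "alpha_layer.weight" && PySem.Set.contains keys "U_real_layer.weight") then "s4d_dplr"
  else if has "selector." && PySem.Set.contains keys "alpha_layer.weight" then "s4d"
  else if has "selector." && PySem.Set.contains keys "nu_layer.weight" then "clru"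
  else if has "ode_func.net." then "nonlinear"
  else if has "trans_encoder." && PySem.Set.contains keys "At_layer.weight" then "linear"
  else "linear"

-- ===== PORT B =====
-- (bit, exact?, pattern): exact -> key == pattern, else pattern is a substring of the key
def pvFeatures : List (Nat × Bool × String) :=
  [(0, true, "sindy_coefficients"), (1, true, "ren_H"), (2, true, "K"),
   (3, true, "U_skew_params"), (4, true, "sigma_raw"), (5, true, "A_bilinear"),
   (6, true, "exp_r_real"), (7, true, "A_skew_params"), (8, true, "B_ctrl"),
   (9, true, "A_log"), (10, true, "delta_proj.weight"), (11, true, "out_proj.weight"),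
   (12, true, "Kt_layer.weight"), (13, true, "eig_raw"), (13, true, "eig_mag_raw"),
   (14, true, "At_layer.weight"), (15, true, "alpha_layer.weight"), (16, true, "V_real"),
   (17, true, "U_real_layer.weight"), (18, true, "nu_layer.weight"),
   (19, false, "cde_func.net."), (20, false, "drift_net."), (21, false, "diffusion_net."),
   (22, false, "temporal_transformer."), (23, false, "branch_net."), (24, false, "trunk_net."),
   (25, false, "spectral_gates."), (26, false, "rnn_lambda_real."),
   (27, false, "aft.aft_W_q"), (28, false, "lift_net."), (29, false, "H_net."),
   (30, false, "lstm_cells."), (31, false, "gru_cells."), (32, false, "selector."),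
   (33, false, "ode_func.net.")]

-- (required bits, forbidden bits, label); first match wins, default "linear"
def pvRules : List (List Nat × List Nat × String) :=
  [([0], [], "sindy"), ([19], [], "neural_cde"), ([20, 21], [], "latent_sde"),
   ([22], [], "transformer"), ([23, 24], [], "deeponet"), ([25, 26], [], "skolr"),
   ([1], [], "ren"), ([2, 27], [], "koopman_aft"), ([3, 4], [], "dissipative_koopman"),
   ([5], [], "bilinear_koopman"), ([28, 6], [], "isfno"), ([7], [], "ct_koopman"),
   ([29, 8], [], "hamiltonian"), ([30], [], "lstm"), ([31], [], "gru"),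
   ([9, 10, 11], [], "mamba2"), ([9, 10], [], "mamba"), ([32, 12], [], "deep_koopman"),
   ([13], [32], "stable_koopman"), ([2], [14], "koopman"),
   ([32, 15, 16], [], "s5"), ([32, 15, 17], [], "s4d_dplr"), ([32, 15], [], "s4d"),
   ([32, 18], [], "clru"), ([33], [], "nonlinear")]

-- the 'for req, forb, label in _RULES: if …: return label / return "linear"' loop
def pvSelect (mask : Nat) : List (List Nat × List Nat × String) → String
  | [] => "linear"
  | (req, forb, label) :: rest =>
    if req.all (fun b => (mask >>> b) &&& 1 == 1) && !(forb.any (fun b => (mask >>> b) &&& 1 == 1))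
    then label else pvSelect mask rest

def detect_transition_type_from_keys_py_alt (sd : List (String × String)) : String :=
  let keys : PySem.Set String := PySem.Set.ofList (PySem.Dict.keys (PySem.Dict.mk sd))
  let mask : Nat :=
    keys.foldl (fun m k =>
      pvFeatures.foldl (fun m f =>
        if (if f.2.1 then f.2.2 == k else PySem.Str.isIn f.2.2 k) then m ||| (1 <<< f.1) else m) m) 0
  pvSelect mask pvRules

-- ===== PRECONDITION & SPEC =====
def Spec_detect_transition_type_from_keys_py (sd : List (String × String)) (out : String) : Prop := out = detect_transition_type_from_keys_py_alt sd
instance (sd : List (String × String)) (out : String) : Decidable (Spec_detect_transition_type_from_keys_py sd out) := by unfold Spec_detect_transition_type_from_keys_py; infer_instance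

-- ===== CLAIM (what is proved, stated in full; the proofs are below) =====
def Claim_equal_detect_transition_type_from_keys_py : Prop := ∀ (sd : List (String × String)), Dom_detect_transition_type_from_keys_py sd → Spec_detect_transition_type_from_keys_py sd (detect_transition_type_from_keys_py sd)

-- ===== LEMMAS AND PROOFS =====

-- the Python truthiness test '(mask >> b) & 1' is exactly Nat.testBit
theorem pvBitTest (m i : Nat) : ((m >>> i) &&& 1 == 1) = m.testBit i := by
  simp [Nat.testBit, Nat.and_comm]

-- any distributes over || (used to split the shared eig bit into A's two membership tests)
theorem pvAnyOr {a : Type} (p q : a -> Bool) : forall (l : List a),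
    (l.any fun x => p x || q x) = (l.any p || l.any q)
  | [] => by simp
  | x :: l => by simp [pvAnyOr p q l]; ac_rfl

-- inner loop over the feature table: bit i of a key's contribution
theorem pvInnerFold (k : String) (i : Nat) : ∀ (fs : List (Nat × Bool × String)) (m : Nat),
    (fs.foldl (fun m f =>
      if (if f.2.1 then f.2.2 == k else PySem.Str.isIn f.2.2 k) then m ||| (1 <<< f.1) else m) m).testBit i
    = (m.testBit i || fs.any (fun f => f.1 == i && (if f.2.1 then f.2.2 == k else PySem.Str.isIn f.2.2 k)))
  | [], m => by simp
  | f :: fs, m => by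
    rw [List.foldl_cons, List.any_cons]
    have hb : (1 <<< f.1).testBit i = (f.1 == i) := by
      rw [Nat.shiftLeft_eq, one_mul]
      simp [Nat.testBit_two_pow, beq_eq_decide]
    cases hc : (if f.2.1 then f.2.2 == k else PySem.Str.isIn f.2.2 k) with
    | false =>
      rw [if_neg (by simp [hc]), pvInnerFold k i fs]
      simp [hc]
    | true =>
      rw [if_pos (by simp [hc]), pvInnerFold k i fs, Nat.testBit_or, hb]
      simp [hc, Bool.or_assoc]

-- outer loop over the keys: bit i of the mask is set iff some key contributes it
theorem pvOuterFold (i : Nat) : ∀ (ks : List String) (m0 : Nat),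
    (ks.foldl (fun m k =>
      pvFeatures.foldl (fun m f =>
        if (if f.2.1 then f.2.2 == k else PySem.Str.isIn f.2.2 k) then m ||| (1 <<< f.1) else m) m) m0).testBit i
    = (m0.testBit i || ks.any (fun k => pvFeatures.any (fun f => f.1 == i && (if f.2.1 then f.2.2 == k else PySem.Str.isIn f.2.2 k))))
  | [], m0 => by simp
  | k :: ks, m0 => by
    rw [List.foldl_cons, List.any_cons, pvOuterFold i ks, pvInnerFold, Bool.or_assoc]

-- which single feature predicate each bit of the mask stands for (one lemma per bit)
theorem pvBitAtom0 (k : String) : (pvFeatures.any fun f => f.1 == 0 && (if f.2.1 then f.2.2 == k else PySem.Str.isIn f.2.2 k)) = ("sindy_coefficients" == k) := by simp [pvFeatures]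
theorem pvBitAtom1 (k : String) : (pvFeatures.any fun f => f.1 == 1 && (if f.2.1 then f.2.2 == k else PySem.Str.isIn f.2.2 k)) = ("ren_H" == k) := by simp [pvFeatures]
theorem pvBitAtom2 (k : String) : (pvFeatures.any fun f => f.1 == 2 && (if f.2.1 then f.2.2 == k else PySem.Str.isIn f.2.2 k)) = ("K" == k) := by simp [pvFeatures]
theorem pvBitAtom3 (k : String) : (pvFeatures.any fun f => f.1 == 3 && (if f.2.1 then f.2.2 == k else PySem.Str.isIn f.2.2 k)) = ("U_skew_params" == k) := by simp [pvFeatures]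
theorem pvBitAtom4 (k : String) : (pvFeatures.any fun f => f.1 == 4 && (if f.2.1 then f.2.2 == k else PySem.Str.isIn f.2.2 k)) = ("sigma_raw" == k) := by simp [pvFeatures]
theorem pvBitAtom5 (k : String) : (pvFeatures.any fun f => f.1 == 5 && (if f.2.1 then f.2.2 == k else PySem.Str.isIn f.2.2 k)) = ("A_bilinear" == k) := by simp [pvFeatures]
theorem pvBitAtom6 (k : String) : (pvFeatures.any fun f => f.1 == 6 && (if f.2.1 then f.2.2 == k else PySem.Str.isIn f.2.2 k)) = ("exp_r_real" == k) := by simp [pvFeatures]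
theorem pvBitAtom7 (k : String) : (pvFeatures.any fun f => f.1 == 7 && (if f.2.1 then f.2.2 == k else PySem.Str.isIn f.2.2 k)) = ("A_skew_params" == k) := by simp [pvFeatures]
theorem pvBitAtom8 (k : String) : (pvFeatures.any fun f => f.1 == 8 && (if f.2.1 then f.2.2 == k else PySem.Str.isIn f.2.2 k)) = ("B_ctrl" == k) := by simp [pvFeatures]
theorem pvBitAtom9 (k : String) : (pvFeatures.any fun f => f.1 == 9 && (if f.2.1 then f.2.2 == k else PySem.Str.isIn f.2.2 k)) = ("A_log" == k) := by simp [pvFeatures]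
theorem pvBitAtom10 (k : String) : (pvFeatures.any fun f => f.1 == 10 && (if f.2.1 then f.2.2 == k else PySem.Str.isIn f.2.2 k)) = ("delta_proj.weight" == k) := by simp [pvFeatures]
theorem pvBitAtom11 (k : String) : (pvFeatures.any fun f => f.1 == 11 && (if f.2.1 then f.2.2 == k else PySem.Str.isIn f.2.2 k)) = ("out_proj.weight" == k) := by simp [pvFeatures]
theorem pvBitAtom12 (k : String) : (pvFeatures.any fun f => f.1 == 12 && (if f.2.1 then f.2.2 == k else PySem.Str.isIn f.2.2 k)) = ("Kt_layer.weight" == k) := by simp [pvFeatures]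
theorem pvBitAtom13 (k : String) : (pvFeatures.any fun f => f.1 == 13 && (if f.2.1 then f.2.2 == k else PySem.Str.isIn f.2.2 k)) = ("eig_raw" == k || "eig_mag_raw" == k) := by simp [pvFeatures]
theorem pvBitAtom14 (k : String) : (pvFeatures.any fun f => f.1 == 14 && (if f.2.1 then f.2.2 == k else PySem.Str.isIn f.2.2 k)) = ("At_layer.weight" == k) := by simp [pvFeatures]
theorem pvBitAtom15 (k : String) : (pvFeatures.any fun f => f.1 == 15 && (if f.2.1 then f.2.2 == k else PySem.Str.isIn f.2.2 k)) = ("alpha_layer.weight" == k) := by simp [pvFeatures]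
theorem pvBitAtom16 (k : String) : (pvFeatures.any fun f => f.1 == 16 && (if f.2.1 then f.2.2 == k else PySem.Str.isIn f.2.2 k)) = ("V_real" == k) := by simp [pvFeatures]
theorem pvBitAtom17 (k : String) : (pvFeatures.any fun f => f.1 == 17 && (if f.2.1 then f.2.2 == k else PySem.Str.isIn f.2.2 k)) = ("U_real_layer.weight" == k) := by simp [pvFeatures]
theorem pvBitAtom18 (k : String) : (pvFeatures.any fun f => f.1 == 18 && (if f.2.1 then f.2.2 == k else PySem.Str.isIn f.2.2 k)) = ("nu_layer.weight" == k) := by simp [pvFeatures]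
theorem pvBitAtom19 (k : String) : (pvFeatures.any fun f => f.1 == 19 && (if f.2.1 then f.2.2 == k else PySem.Str.isIn f.2.2 k)) = PySem.Str.isIn "cde_func.net." k := by simp [pvFeatures]
theorem pvBitAtom20 (k : String) : (pvFeatures.any fun f => f.1 == 20 && (if f.2.1 then f.2.2 == k else PySem.Str.isIn f.2.2 k)) = PySem.Str.isIn "drift_net." k := by simp [pvFeatures]
theorem pvBitAtom21 (k : String) : (pvFeatures.any fun f => f.1 == 21 && (if f.2.1 then f.2.2 == k else PySem.Str.isIn f.2.2 k)) = PySem.Str.isIn "diffusion_net." k := by simp [pvFeatures]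
theorem pvBitAtom22 (k : String) : (pvFeatures.any fun f => f.1 == 22 && (if f.2.1 then f.2.2 == k else PySem.Str.isIn f.2.2 k)) = PySem.Str.isIn "temporal_transformer." k := by simp [pvFeatures]
theorem pvBitAtom23 (k : String) : (pvFeatures.any fun f => f.1 == 23 && (if f.2.1 then f.2.2 == k else PySem.Str.isIn f.2.2 k)) = PySem.Str.isIn "branch_net." k := by simp [pvFeatures]
theorem pvBitAtom24 (k : String) : (pvFeatures.any fun f => f.1 == 24 && (if f.2.1 then f.2.2 == k else PySem.Str.isIn f.2.2 k)) = PySem.Str.isIn "trunk_net." k := by simp [pvFeatures]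
theorem pvBitAtom25 (k : String) : (pvFeatures.any fun f => f.1 == 25 && (if f.2.1 then f.2.2 == k else PySem.Str.isIn f.2.2 k)) = PySem.Str.isIn "spectral_gates." k := by simp [pvFeatures]
theorem pvBitAtom26 (k : String) : (pvFeatures.any fun f => f.1 == 26 && (if f.2.1 then f.2.2 == k else PySem.Str.isIn f.2.2 k)) = PySem.Str.isIn "rnn_lambda_real." k := by simp [pvFeatures]
theorem pvBitAtom27 (k : String) : (pvFeatures.any fun f => f.1 == 27 && (if f.2.1 then f.2.2 == k else PySem.Str.isIn f.2.2 k)) = PySem.Str.isIn "aft.aft_W_q" k := by simp [pvFeatures]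
theorem pvBitAtom28 (k : String) : (pvFeatures.any fun f => f.1 == 28 && (if f.2.1 then f.2.2 == k else PySem.Str.isIn f.2.2 k)) = PySem.Str.isIn "lift_net." k := by simp [pvFeatures]
theorem pvBitAtom29 (k : String) : (pvFeatures.any fun f => f.1 == 29 && (if f.2.1 then f.2.2 == k else PySem.Str.isIn f.2.2 k)) = PySem.Str.isIn "H_net." k := by simp [pvFeatures]
theorem pvBitAtom30 (k : String) : (pvFeatures.any fun f => f.1 == 30 && (if f.2.1 then f.2.2 == k else PySem.Str.isIn f.2.2 k)) = PySem.Str.isIn "lstm_cells." k := by simp [pvFeatures]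
theorem pvBitAtom31 (k : String) : (pvFeatures.any fun f => f.1 == 31 && (if f.2.1 then f.2.2 == k else PySem.Str.isIn f.2.2 k)) = PySem.Str.isIn "gru_cells." k := by simp [pvFeatures]
theorem pvBitAtom32 (k : String) : (pvFeatures.any fun f => f.1 == 32 && (if f.2.1 then f.2.2 == k else PySem.Str.isIn f.2.2 k)) = PySem.Str.isIn "selector." k := by simp [pvFeatures]
theorem pvBitAtom33 (k : String) : (pvFeatures.any fun f => f.1 == 33 && (if f.2.1 then f.2.2 == k else PySem.Str.isIn f.2.2 k)) = PySem.Str.isIn "ode_func.net." k := by simp [pvFeatures]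

-- ===== VERDICT (by name: the statement is the Claim_ definition above) =====
set_option maxHeartbeats 2000000 in
set_option maxRecDepth 8000 in
theorem detect_transition_type_from_keys_py_spec : Claim_equal_detect_transition_type_from_keys_py := by
  intro sd _
  unfold Spec_detect_transition_type_from_keys_py
  unfold detect_transition_type_from_keys_py detect_transition_type_from_keys_py_alt
  dsimp only
  generalize PySem.Set.ofList (PySem.Dict.keys (PySem.Dict.mk sd)) = ks
  simp only [pvSelect, pvRules, List.all_cons, List.all_nil, List.any_cons, List.any_nil,
    Bool.and_true, Bool.not_false, Bool.or_false, pvBitTest]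
  simp only [pvOuterFold, Nat.zero_testBit, Bool.false_or]
  simp only [pvBitAtom0, pvBitAtom1, pvBitAtom2, pvBitAtom3, pvBitAtom4, pvBitAtom5, pvBitAtom6,
    pvBitAtom7, pvBitAtom8, pvBitAtom9, pvBitAtom10, pvBitAtom11, pvBitAtom12, pvBitAtom13,
    pvBitAtom14, pvBitAtom15, pvBitAtom16, pvBitAtom17, pvBitAtom18, pvBitAtom19, pvBitAtom20,
    pvBitAtom21, pvBitAtom22, pvBitAtom23, pvBitAtom24, pvBitAtom25, pvBitAtom26, pvBitAtom27,
    pvBitAtom28, pvBitAtom29, pvBitAtom30, pvBitAtom31, pvBitAtom32, pvBitAtom33]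
  simp only [pvAnyOr, List.any_beq, PySem.Set.contains_eq_listContains]
  simp only [ite_self]
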